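-- pv_equiv track=rewrite | github.com/majoporse/uni | ib111/04/p6_divisors.py | common_divisors
-- ===== SOURCE A (Python) =====
-- def dividors (a,b):
--     count = 1
--     if b>a:
--         a,b = b,a
--     for i in range(2, b+1):
--         if b%i == 0 and a%i == 0 :
--             count += 1
--     return count
--
-- def common_divisors(rows, cols):
--     table = []
--     for i in range (rows):
--         tablerow = []
--         for j in range (cols):
--             tablerow.append(dividors(i+1,j+1))
--         table.append(tablerow)
--     return table
-- ===== SOURCE B (Python) =====
-- def _gcd(a, b):
--     while b:
--         a, b = b, a % b
--     return a
--
--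
-- def _num_divisors(g):
--     cnt = 0
--     d = 1
--     while d * d <= g:
--         if g % d == 0:
--             cnt += 1 if d * d == g else 2
--         d += 1
--     return cnt
--
--
-- def common_divisors(rows, cols):
--     return [[_num_divisors(_gcd(i + 1, j + 1)) for j in range(cols)]
--             for i in range(rows)]
-- ===== Notes on version B (the rewrite author's own statement) =====
-- stated objective: faster
-- what changed: A counts common divisors of (i+1, j+1) by trial-dividing every candidate up to min(i+1, j+1); B computes g = gcd(i+1, j+1) by the Euclidean algorithm and counts the divisors of g in pairs (d, g//d) with d running only up to sqrt(g).
import Mathlib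
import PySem

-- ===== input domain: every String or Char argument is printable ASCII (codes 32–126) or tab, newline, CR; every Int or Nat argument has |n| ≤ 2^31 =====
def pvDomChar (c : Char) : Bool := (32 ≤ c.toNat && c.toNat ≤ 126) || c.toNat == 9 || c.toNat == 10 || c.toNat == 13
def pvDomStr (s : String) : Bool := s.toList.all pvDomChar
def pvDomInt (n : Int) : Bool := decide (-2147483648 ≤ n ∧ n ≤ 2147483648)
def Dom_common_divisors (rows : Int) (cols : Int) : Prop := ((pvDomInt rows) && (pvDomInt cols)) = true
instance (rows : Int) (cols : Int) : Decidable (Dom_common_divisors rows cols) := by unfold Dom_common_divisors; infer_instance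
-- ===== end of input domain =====

-- B replaces A's per-cell trial division over every candidate up to min(i+1, j+1) by
-- Euclid's gcd followed by counting the divisors of the gcd in pairs (d, g//d) with d
-- running only up to sqrt(g); the produced table is identical.

-- ===== PORT A =====
-- port of dividors(a, b): swap so the second component is the smaller, then count
-- i in range(2, b+1) dividing both
def dividors (a : Int) (b : Int) : Int :=
  let p := if b > a then (b, a) else (a, b)
  (PySem.List.pyRange 2 (p.2 + 1) 1).foldl
    (fun count i =>
      if (PySem.Int.mod p.2 i == 0 && PySem.Int.mod p.1 i == 0) = true then count + 1 else count) 1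

def common_divisors (rows : Int) (cols : Int) : List (List Int) :=
  (PySem.List.pyRange 0 rows 1).foldl
    (fun table i =>
      table ++ [(PySem.List.pyRange 0 cols 1).foldl
        (fun tablerow j => tablerow ++ [dividors (i + 1) (j + 1)]) []]) []

-- ===== PORT B =====
-- port of _gcd: while b: a, b = b, a % b
def pyGcd (a : Int) (b : Int) : Int :=
  if b = 0 then a else pyGcd b (PySem.Int.mod a b)
termination_by b.natAbs
decreasing_by
  rename_i h
  rcases lt_trichotomy b 0 with hb | hb | hb
  · have := PySem.Int.mod_neg_bounds (a := a) hb
    omega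
  · exact absurd hb h
  · have h1 := PySem.Int.mod_nonneg (a := a) hb
    have h2 := PySem.Int.mod_lt (a := a) hb
    omega

-- port of _num_divisors: while d*d <= g, counting d (and the cofactor once when d*d < g)
def tauLoop (g : Int) (d : Int) (cnt : Int) : Int :=
  if d * d ≤ g then
    tauLoop g (d + 1)
      (if PySem.Int.mod g d == 0 then (if d * d == g then cnt + 1 else cnt + 2) else cnt)
  else cnt
termination_by (g + 1 - d).toNat
decreasing_by
  rename_i h
  have hd : d ≤ g := by nlinarith [sq_nonneg d, sq_nonneg (d - 1)]
  omega

def numDivisors (g : Int) : Int := tauLoop g 1 0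

def common_divisors_alt (rows : Int) (cols : Int) : List (List Int) :=
  (PySem.List.pyRange 0 rows 1).map (fun i =>
    (PySem.List.pyRange 0 cols 1).map (fun j => numDivisors (pyGcd (i + 1) (j + 1))))

-- ===== PRECONDITION & SPEC =====
def Spec_common_divisors (rows : Int) (cols : Int) (out : List (List Int)) : Prop := out = common_divisors_alt rows cols
instance (rows : Int) (cols : Int) (out : List (List Int)) : Decidable (Spec_common_divisors rows cols out) := by unfold Spec_common_divisors; infer_instance

-- ===== CLAIM (what is proved, stated in full; the proofs are below) =====
def Claim_equal_common_divisors : Prop := ∀ (rows : Int) (cols : Int), Dom_common_divisors rows cols → Spec_common_divisors rows cols (common_divisors rows cols)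

-- ===== LEMMAS AND PROOFS =====

-- B's gcd loop computes Nat.gcd on nonnegative inputs
theorem pyGcd_eq (a b : Int) (ha : 0 ≤ a) (hb : 0 ≤ b) :
    pyGcd a b = (Nat.gcd a.natAbs b.natAbs : Int) := by
  rw [pyGcd]
  split
  · rename_i h
    subst h
    rw [Int.natAbs_zero, Nat.gcd_zero_right]
    exact (Int.natAbs_of_nonneg ha).symm
  · rename_i h
    have hbpos : 0 < b := lt_of_le_of_ne hb (Ne.symm h)
    have hm := PySem.Int.mod_eq_emod_of_pos (a := a) hbpos
    have h1 : 0 ≤ PySem.Int.mod a b := PySem.Int.mod_nonneg (a := a) hbpos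
    rw [pyGcd_eq b (PySem.Int.mod a b) hb h1]
    have hmn : (PySem.Int.mod a b).natAbs = a.natAbs % b.natAbs := by
      rw [hm, ← Int.natAbs_of_nonneg ha, ← Int.natAbs_of_nonneg hbpos.le, ← Int.natCast_mod,
        Int.natAbs_natCast, Int.natAbs_natCast, Int.natAbs_natCast]
    congr 1
    rw [hmn, Nat.gcd_comm b.natAbs, ← Nat.gcd_rec, Nat.gcd_comm]
termination_by b.natAbs
decreasing_by
  have h2 := PySem.Int.mod_lt (a := a) hbpos
  omega

-- the set of divisors of g that B's sqrt loop, standing at candidate d, has yet to count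
def pendingDivs (g d : Nat) : Finset Nat :=
  g.divisors.filter (fun e => (d ≤ e ∧ e * e ≤ g) ∨ (g < e * e ∧ d * e ≤ g))

-- a divisor squeezed between g/(d+1) and g/d is exactly the cofactor of d
theorem cofactor_eq (g d e : Nat) (he : e ∣ g) (h1 : 1 ≤ e) (h2 : d * e ≤ g) (h3 : g < (d + 1) * e) :
    g = d * e := by
  obtain ⟨k, hk⟩ := he
  subst hk
  have hk1 : d ≤ k := by nlinarith
  have hk2 : k ≤ d := by nlinarith
  have : k = d := le_antisymm hk2 hk1
  subst this
  ring

theorem pending_empty (g d : Nat) (h : g < d * d) : pendingDivs g d = ∅ := by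
  ext e
  simp only [pendingDivs, Finset.mem_filter, Nat.mem_divisors, Finset.notMem_empty, iff_false]
  rintro ⟨⟨he, hg0⟩, ⟨h1, h2⟩ | ⟨h1, h2⟩⟩
  · nlinarith
  · have he1 : 1 ≤ e := Nat.pos_of_dvd_of_pos he (Nat.pos_of_ne_zero hg0)
    nlinarith

theorem pending_not_dvd (g d : Nat) (hg : 1 ≤ g) (h : ¬ d ∣ g) :
    pendingDivs g d = pendingDivs g (d + 1) := by
  ext e
  simp only [pendingDivs, Finset.mem_filter, Nat.mem_divisors]
  constructor
  · rintro ⟨⟨he, hg0⟩, hp⟩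
    refine ⟨⟨he, hg0⟩, ?_⟩
    have he1 : 1 ≤ e := Nat.pos_of_dvd_of_pos he hg
    rcases hp with ⟨h1, h2⟩ | ⟨h1, h2⟩
    · left
      refine ⟨?_, h2⟩
      rcases Nat.lt_or_ge d e with h' | h'
      · omega
      · have : e = d := by omega
        subst this
        exact absurd he h
    · right
      refine ⟨h1, ?_⟩
      rcases Nat.lt_or_ge g ((d + 1) * e) with h' | h'
      · have hge := cofactor_eq g d e he he1 h2 h'
        exact absurd ⟨e, hge⟩ h
      · exact h'
  · rintro ⟨⟨he, hg0⟩, hp⟩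
    refine ⟨⟨he, hg0⟩, ?_⟩
    rcases hp with ⟨h1, h2⟩ | ⟨h1, h2⟩
    · left; omega
    · right
      exact ⟨h1, by nlinarith⟩

theorem pending_eq_sq (g d : Nat) (hg : 1 ≤ g) (hdd : d * d = g) (h : d ∣ g) :
    pendingDivs g d = insert d (pendingDivs g (d + 1)) ∧ d ∉ pendingDivs g (d + 1) := by
  constructor
  · ext e
    simp only [pendingDivs, Finset.mem_filter, Nat.mem_divisors, Finset.mem_insert]
    constructor
    · rintro ⟨⟨he, hg0⟩, hp⟩
      have he1 : 1 ≤ e := Nat.pos_of_dvd_of_pos he hg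
      rcases hp with ⟨h1, h2⟩ | ⟨h1, h2⟩
      · rcases Nat.lt_or_ge d e with h' | h'
        · right; exact ⟨⟨he, hg0⟩, Or.inl ⟨by omega, h2⟩⟩
        · left; omega
      · exfalso
        have hd1 : 1 ≤ d := by
          by_contra h'
          have hd0 : d = 0 := by omega
          subst hd0
          simp at hdd
          omega
        have hed : e ≤ d := Nat.le_of_mul_le_mul_left (by linarith : d * e ≤ d * d) (by omega)
        nlinarith
    · rintro (heq | ⟨⟨he, hg0⟩, hp⟩)
      · subst heq
        exact ⟨⟨h, by omega⟩, Or.inl ⟨le_rfl, le_of_eq hdd⟩⟩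
      · refine ⟨⟨he, hg0⟩, ?_⟩
        rcases hp with ⟨h1, h2⟩ | ⟨h1, h2⟩
        · left; omega
        · right; exact ⟨h1, by nlinarith⟩
  · simp only [pendingDivs, Finset.mem_filter, Nat.mem_divisors]
    rintro ⟨⟨he, hg0⟩, ⟨h1, h2⟩ | ⟨h1, h2⟩⟩
    · omega
    · linarith

theorem pending_lt_sq (g d : Nat) (hd : 1 ≤ d) (hdd : d * d < g) (h : d ∣ g) :
    pendingDivs g d = insert d (insert (g / d) (pendingDivs g (d + 1))) ∧
      d ∉ insert (g / d) (pendingDivs g (d + 1)) ∧ g / d ∉ pendingDivs g (d + 1) := by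
  have hg : 1 ≤ g := by nlinarith
  have hmul : d * (g / d) = g := Nat.mul_div_cancel' h
  have hcd : g / d ∣ g := Nat.div_dvd_of_dvd h
  have hdlt : d < g / d := Nat.lt_of_mul_lt_mul_left (a := d) (by rw [hmul]; exact hdd)
  have hq1 : 1 ≤ g / d := by omega
  have hco : g < (g / d) * (g / d) := by nlinarith
  refine ⟨?_, ?_, ?_⟩
  · ext e
    simp only [pendingDivs, Finset.mem_filter, Nat.mem_divisors, Finset.mem_insert]
    constructor
    · rintro ⟨⟨he, hg0⟩, hp⟩
      have he1 : 1 ≤ e := Nat.pos_of_dvd_of_pos he hg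
      rcases hp with ⟨h1, h2⟩ | ⟨h1, h2⟩
      · rcases Nat.lt_or_ge d e with h' | h'
        · right; right; exact ⟨⟨he, hg0⟩, Or.inl ⟨by omega, h2⟩⟩
        · left; omega
      · rcases Nat.lt_or_ge g ((d + 1) * e) with h' | h'
        · have hge := cofactor_eq g d e he he1 h2 h'
          right; left
          rw [hge, Nat.mul_div_cancel_left e (by omega)]
        · right; right; exact ⟨⟨he, hg0⟩, Or.inr ⟨h1, h'⟩⟩
    · rintro (heq | heq | ⟨⟨he, hg0⟩, hp⟩)
      · subst heq
        exact ⟨⟨h, by omega⟩, Or.inl ⟨le_rfl, le_of_lt hdd⟩⟩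
      · subst heq
        exact ⟨⟨hcd, by omega⟩, Or.inr ⟨hco, le_of_eq hmul⟩⟩
      · refine ⟨⟨he, hg0⟩, ?_⟩
        rcases hp with ⟨h1, h2⟩ | ⟨h1, h2⟩
        · left; omega
        · right; exact ⟨h1, by nlinarith⟩
  · simp only [Finset.mem_insert, pendingDivs, Finset.mem_filter, Nat.mem_divisors]
    rintro (h' | ⟨⟨he, hg0⟩, ⟨h1, h2⟩ | ⟨h1, h2⟩⟩)
    · exact absurd h' hdlt.ne
    · omega
    · linarith
  · simp only [pendingDivs, Finset.mem_filter, Nat.mem_divisors]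
    rintro ⟨⟨he, hg0⟩, ⟨h1, h2⟩ | ⟨h1, h2⟩⟩
    · linarith
    · nlinarith

theorem pending_one (g : Nat) (hg : 1 ≤ g) : pendingDivs g 1 = g.divisors := by
  ext e
  simp only [pendingDivs, Finset.mem_filter, Nat.mem_divisors, and_iff_left_iff_imp]
  rintro ⟨he, hg0⟩
  have he1 : 1 ≤ e := Nat.pos_of_dvd_of_pos he hg
  have heg : e ≤ g := Nat.le_of_dvd hg he
  rcases Nat.lt_or_ge g (e * e) with h' | h'
  · right; exact ⟨h', by omega⟩
  · left; exact ⟨he1, h'⟩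

-- loop invariant of B's sqrt loop: it adds exactly the number of still-pending divisors
theorem tauLoop_inv (g d : Nat) (cnt : Int) (hg : 1 ≤ g) (hd : 1 ≤ d) :
    tauLoop (g : Int) (d : Int) cnt = cnt + ((pendingDivs g d).card : Int) := by
  rw [tauLoop]
  split
  · rename_i hle
    have hdd : d * d ≤ g := by exact_mod_cast hle
    have hcast : ((d : Int) + 1) = ((d + 1 : Nat) : Int) := by push_cast; ring
    rw [hcast, tauLoop_inv g (d + 1) _ hg (by omega)]
    have hmod : (PySem.Int.mod (g : Int) (d : Int) == 0) = decide (d ∣ g) := by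
      by_cases hdvd : d ∣ g <;>
        simp [Int.natCast_dvd_natCast, hdvd]
    rw [hmod]
    rcases Decidable.em (d ∣ g) with hdvd | hdvd
    · rcases eq_or_lt_of_le hdd with heq | hlt
      · obtain ⟨hset, hmem⟩ := pending_eq_sq g d hg heq hdvd
        have hbeq : ((d : Int) * d == (g : Int)) = true := by
          simp only [beq_iff_eq]; exact_mod_cast heq
        simp only [hdvd, decide_true, if_true, hbeq, hset,
          Finset.card_insert_of_notMem hmem]
        push_cast; ring
      · obtain ⟨hset, hm1, hm2⟩ := pending_lt_sq g d hd hlt hdvd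
        have hbeq : ((d : Int) * d == (g : Int)) = false := by
          simp only [beq_eq_false_iff_ne, ne_eq]
          intro hc
          have : d * d = g := by exact_mod_cast hc
          omega
        simp only [hdvd, decide_true, if_true, hbeq, Bool.false_eq_true, if_false, hset,
          Finset.card_insert_of_notMem hm1, Finset.card_insert_of_notMem hm2]
        push_cast; ring
    · simp only [hdvd, decide_false, Bool.false_eq_true, if_false]
      rw [pending_not_dvd g d hg hdvd]
  · rename_i hle
    have : g < d * d := by
      have : ¬ ((d : Int) * d ≤ (g : Int)) := hle
      push_cast at this
      exact_mod_cast not_le.mp this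
    rw [pending_empty g d this]
    simp
termination_by (g + 1 - d)
decreasing_by
  have hdg : d ≤ g := by nlinarith
  omega

theorem numDivisors_eq (g : Nat) (hg : 1 ≤ g) :
    numDivisors (g : Int) = (g.divisors.card : Int) := by
  unfold numDivisors
  have h1 : (1 : Int) = ((1 : Nat) : Int) := rfl
  rw [h1, tauLoop_inv g 1 0 hg le_rfl, pending_one g hg]
  ring

theorem countP_range_eq (n : Nat) (p : Nat → Bool) :
    (List.range n).countP p = ((Finset.range n).filter (fun k => p k)).card := by
  simp [Finset.filter, Finset.card, Finset.range, Multiset.range, Multiset.filter,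
    List.countP_eq_length_filter]

-- A's trial-division loop (y the smaller argument) counts the divisors of gcd(x, y)
theorem count_core (x y : Nat) (hx : 1 ≤ x) (hy : 1 ≤ y) :
    (PySem.List.pyRange 2 ((y : Int) + 1) 1).foldl
      (fun count i =>
        if (PySem.Int.mod (y : Int) i == 0 && PySem.Int.mod (x : Int) i == 0) = true
        then count + 1 else count) 1
    = ((Nat.gcd x y).divisors.card : Int) := by
  set g := Nat.gcd x y with hgdef
  have hg : 1 ≤ g := Nat.gcd_pos_of_pos_left y hx
  have hgy : g ≤ y := Nat.le_of_dvd hy (Nat.gcd_dvd_right x y)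
  rw [PySem.List.foldl_count_if]
  rw [PySem.List.pyRange_one, List.countP_map]
  have hlen : ((y : Int) + 1 - 2).toNat = y - 1 := by omega
  rw [hlen]
  have hpred : ∀ k : Nat,
      ((fun i => PySem.Int.mod (y : Int) i == 0 && PySem.Int.mod (x : Int) i == 0) ∘
        (fun k : Nat => (2 : Int) + (k : Int))) k = true ↔ (decide ((2 + k) ∣ g)) = true := by
    intro k
    simp only [Function.comp_apply, Bool.and_eq_true, beq_iff_eq,
      PySem.Int.mod_eq_zero_iff_dvd, decide_eq_true_eq]
    constructor
    · rintro ⟨h1, h2⟩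
      exact Nat.dvd_gcd (by exact_mod_cast h2) (by exact_mod_cast h1)
    · intro hd
      exact ⟨by exact_mod_cast hd.trans (Nat.gcd_dvd_right x y),
        by exact_mod_cast hd.trans (Nat.gcd_dvd_left x y)⟩
  rw [List.countP_congr (fun k _ => hpred k), countP_range_eq]
  have hbij : ((Finset.range (y - 1)).filter (fun k => decide ((2 + k) ∣ g))).card
      = (g.divisors.filter (fun e => 2 ≤ e)).card := by
    apply Finset.card_nbij (i := fun k => k + 2)
    · intro k hk
      simp only [Finset.coe_filter, Set.mem_setOf_eq, Finset.mem_range, decide_eq_true_eq] at hk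
      simp only [Finset.coe_filter, Set.mem_setOf_eq, Nat.mem_divisors]
      refine ⟨⟨?_, by omega⟩, by omega⟩
      rw [Nat.add_comm k 2]
      exact hk.2
    · intro a ha b hb hab
      simp only at hab
      omega
    · intro e he
      simp only [Finset.coe_filter, Set.mem_setOf_eq, Nat.mem_divisors] at he
      obtain ⟨⟨hed, hg0⟩, he2⟩ := he
      have heg : e ≤ g := Nat.le_of_dvd hg hed
      refine ⟨e - 2, ?_, ?_⟩
      · simp only [Finset.coe_filter, Set.mem_setOf_eq, Finset.mem_range, decide_eq_true_eq]
        constructor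
        · omega
        · have h22 : 2 + (e - 2) = e := by omega
          rw [h22]; exact hed
      · simp only
        omega
  rw [hbij]
  have hsplit : g.divisors = insert 1 (g.divisors.filter (fun e => 2 ≤ e)) := by
    ext e
    simp only [Finset.mem_insert, Finset.mem_filter, Nat.mem_divisors]
    constructor
    · rintro ⟨he, hg0⟩
      have : 1 ≤ e := Nat.pos_of_dvd_of_pos he hg
      rcases Nat.lt_or_ge e 2 with h' | h'
      · left; omega
      · right; exact ⟨⟨he, hg0⟩, h'⟩
    · rintro (rfl | ⟨⟨he, hg0⟩, h2⟩)
      · exact ⟨one_dvd g, by omega⟩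
      · exact ⟨he, hg0⟩
  have hnot : 1 ∉ g.divisors.filter (fun e => 2 ≤ e) := by
    simp
  conv_rhs => rw [hsplit]
  rw [Finset.card_insert_of_notMem hnot]
  push_cast; ring

theorem dividors_eq (m n : Nat) (hm : 1 ≤ m) (hn : 1 ≤ n) :
    dividors (m : Int) (n : Int) = ((Nat.gcd m n).divisors.card : Int) := by
  unfold dividors
  by_cases h : (n : Int) > (m : Int)
  · simp only [gt_iff_lt, h, if_true]
    rw [count_core n m hn hm, Nat.gcd_comm]
  · simp only [gt_iff_lt, h, if_false]
    rw [count_core m n hm hn]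

-- the two per-cell computations agree on positive arguments
theorem cell_eq (a b : Nat) (ha : 1 ≤ a) (hb : 1 ≤ b) :
    dividors (a : Int) (b : Int) = numDivisors (pyGcd (a : Int) (b : Int)) := by
  rw [pyGcd_eq _ _ (by omega) (by omega)]
  simp only [Int.natAbs_natCast]
  rw [numDivisors_eq _ (Nat.gcd_pos_iff.mpr (Or.inl ha)), dividors_eq a b ha hb]

-- ===== VERDICT (by name: the statement is the Claim_ definition above) =====
theorem common_divisors_spec : Claim_equal_common_divisors := by
  intro rows cols _
  unfold Spec_common_divisors common_divisors common_divisors_alt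
  rw [PySem.List.foldl_append_singleton_eq_map]
  simp only [List.nil_append]
  apply List.map_congr_left
  intro i hi
  rw [PySem.List.foldl_append_singleton_eq_map]
  simp only [List.nil_append]
  apply List.map_congr_left
  intro j hj
  rw [PySem.List.mem_pyRange_one] at hi hj
  have h1 : i + 1 = ((i + 1).toNat : Int) := by omega
  have h2 : j + 1 = ((j + 1).toNat : Int) := by omega
  rw [h1, h2]
  exact cell_eq _ _ (by omega) (by omega)
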